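-- pv_equiv track=rewrite | github.com/abossard/circuithack | ports/codee/wokwi/codee/game_2048.py | _collapse_line
-- ===== SOURCE A (Python) =====
-- def _collapse_line(line: list[int]) -> tuple[list[int], int]:
--     compact = [value for value in line if value != 0]
--     merged: list[int] = []
--     score_add = 0
--     i = 0
--     while i < len(compact):
--         cur = compact[i]
--         if i + 1 < len(compact) and compact[i + 1] == cur:
--             cur *= 2
--             score_add += cur
--             i += 1
--         merged.append(cur)
--         i += 1
--     merged.extend([0] * (len(line) - len(merged)))
--     return merged, score_add
-- ===== SOURCE B (Python) =====
-- def _collapse_line(line: list[int]) -> tuple[list[int], int]: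
--     merged: list[int] = []
--     score_add = 0
--     just_merged = False
--     for value in line:
--         if value == 0:
--             continue
--         if merged and merged[-1] == value and not just_merged:
--             merged[-1] = 2 * value
--             score_add += 2 * value
--             just_merged = True
--         else:
--             merged.append(value)
--             just_merged = False
--     merged.extend([0] * (len(line) - len(merged)))
--     return merged, score_add
-- ===== Notes on version B (the rewrite author's own statement) =====
-- stated objective: faster
-- what changed: Replaces A's index-based lookahead loop (peeks the next element, advances by 2 on a merge) with a single forward fold that skips zeros inline and carries the merged list plus a just-merged flag, merging into the last merged value.
import Mathlib
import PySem

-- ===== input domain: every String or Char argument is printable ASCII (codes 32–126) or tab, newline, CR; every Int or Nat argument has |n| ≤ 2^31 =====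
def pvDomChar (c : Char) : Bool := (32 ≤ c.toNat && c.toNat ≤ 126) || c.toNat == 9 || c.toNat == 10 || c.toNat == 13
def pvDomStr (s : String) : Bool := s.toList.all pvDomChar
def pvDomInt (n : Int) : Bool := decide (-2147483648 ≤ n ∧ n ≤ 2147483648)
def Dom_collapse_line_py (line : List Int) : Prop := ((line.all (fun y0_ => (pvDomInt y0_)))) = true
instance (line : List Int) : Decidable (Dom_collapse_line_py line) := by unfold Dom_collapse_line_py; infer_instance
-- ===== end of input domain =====

-- B replaces A's index-based lookahead loop (peek at the next element, skip two) with a single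
-- forward fold over the line carrying the merged list and a just-merged flag, skipping the intermediate
-- compact list (objective: faster by a constant factor, measured).

-- ===== PORT A =====
-- A's while loop over `compact` with index i: reads compact[i] and peeks compact[i+1],
-- advancing by 2 on a merge; ported as the corresponding recursion on the remaining list.
def aLoop : List Int → List Int × Int
  | [] => ([], 0)
  | a :: rest =>
    match rest with
    | [] => ([a], 0)
    | b :: rest' =>
      if b = a then
        let p := aLoop rest'
        ((2*a) :: p.1, 2*a + p.2)
      else
        let p := aLoop (b :: rest')
        (a :: p.1, p.2)

def collapse_line_py (line : List Int) : List Int × Int :=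
  let compact := line.filter (fun v => v ≠ 0)
  let p := aLoop compact
  (p.1 ++ List.replicate (line.length - p.1.length) 0, p.2)

-- ===== PORT B =====
-- B's loop body; `merged` is kept in reverse so that Python's last-element access/update is the head.
def bStep (st : List Int × Bool × Int) (v : Int) : List Int × Bool × Int :=
  if v = 0 then st
  else
    match st with
    | (last :: racc, jm, s) =>
      if last = v ∧ jm = false then ((2*v) :: racc, true, s + 2*v)
      else (v :: last :: racc, false, s)
    | ([], _, s) => ([v], false, s)

def collapse_line_py_alt (line : List Int) : List Int × Int :=
  let st := line.foldl bStep ([], false, 0)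
  let merged := st.1.reverse
  (merged ++ List.replicate (line.length - merged.length) 0, st.2.2)

-- ===== PRECONDITION & SPEC =====
def Spec_collapse_line_py (line : List Int) (out : List Int × Int) : Prop := out = collapse_line_py_alt line
instance (line : List Int) (out : List Int × Int) : Decidable (Spec_collapse_line_py line out) := by unfold Spec_collapse_line_py; infer_instance

-- ===== CLAIM (what is proved, stated in full; the proofs are below) =====
def Claim_equal_collapse_line_py : Prop := ∀ (line : List Int), Dom_collapse_line_py line → Spec_collapse_line_py line (collapse_line_py line)

-- ===== LEMMAS AND PROOFS =====

-- B's fold skips zeros in the body; that equals folding over the filtered list.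
theorem foldl_bStep_filter (line : List Int) (st : List Int × Bool × Int) :
    line.foldl bStep st = (line.filter (fun v => v ≠ 0)).foldl bStep st := by
  induction line generalizing st with
  | nil => rfl
  | cons a rest ih =>
    by_cases h : a = 0
    · subst h
      simp [List.foldl, List.filter, bStep, ih]
    · simp [List.foldl, List.filter, h, ih]

-- Key invariant: from a state with one pending (unmerged) value a and flag false,
-- folding B over xs produces exactly aLoop (a :: xs), reversed onto the accumulator.
theorem bFold_aLoop (xs : List Int) (a : Int) (hxs : ∀ v ∈ xs, v ≠ 0)
    (racc : List Int) (s : Int) :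
    ∃ jm', xs.foldl bStep (a :: racc, false, s) =
      ((aLoop (a :: xs)).1.reverse ++ racc, jm', s + (aLoop (a :: xs)).2) := by
  match xs with
  | [] => exact ⟨false, by simp [aLoop]⟩
  | b :: rest =>
    have hb : b ≠ 0 := hxs b (by simp)
    by_cases hab : a = b
    · subst hab
      match rest with
      | [] =>
        refine ⟨true, ?_⟩
        simp [List.foldl, bStep, hb, aLoop]
      | c :: rest2 =>
        have hc : c ≠ 0 := hxs c (by simp)
        obtain ⟨jm', hrec⟩ := bFold_aLoop rest2 c (fun v hv => hxs v (by simp [hv])) ((2*a) :: racc) (s + 2*a)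
        refine ⟨jm', ?_⟩
        have h1 : List.foldl bStep (a :: racc, false, s) (a :: c :: rest2)
            = List.foldl bStep (c :: 2*a :: racc, false, s + 2*a) rest2 := by
          simp [List.foldl, bStep, hb, hc]
        rw [h1, hrec]
        simp [aLoop]
        ring
    · obtain ⟨jm', hrec⟩ := bFold_aLoop rest b (fun v hv => hxs v (by simp [hv])) (a :: racc) s
      refine ⟨jm', ?_⟩
      have h1 : List.foldl bStep (a :: racc, false, s) (b :: rest)
          = List.foldl bStep (b :: a :: racc, false, s) rest := by
        simp [List.foldl, bStep, hb, hab]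
      rw [h1, hrec]
      have h2 : aLoop (a :: b :: rest) = (a :: (aLoop (b :: rest)).1, (aLoop (b :: rest)).2) := by
        simp [aLoop, Ne.symm hab]
      rw [h2]
      simp

theorem bFold_eq_aLoop (xs : List Int) (hxs : ∀ v ∈ xs, v ≠ 0) :
    ∃ jm', xs.foldl bStep ([], false, 0) = ((aLoop xs).1.reverse, jm', (aLoop xs).2) := by
  match xs with
  | [] => exact ⟨false, by simp [aLoop]⟩
  | a :: rest =>
    have ha : a ≠ 0 := hxs a (by simp)
    obtain ⟨jm', hrec⟩ := bFold_aLoop rest a (fun v hv => hxs v (by simp [hv])) [] 0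
    refine ⟨jm', ?_⟩
    simp only [List.foldl, bStep, if_neg ha]
    rw [hrec]
    simp

-- ===== VERDICT (by name: the statement is the Claim_ definition above) =====
theorem collapse_line_py_spec : Claim_equal_collapse_line_py := by
  intro line _
  unfold Spec_collapse_line_py collapse_line_py collapse_line_py_alt
  rw [foldl_bStep_filter]
  obtain ⟨jm', h⟩ := bFold_eq_aLoop (line.filter (fun v => v ≠ 0))
    (fun v hv => by simpa using (List.mem_filter.mp hv).2)
  rw [h]
  simp
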